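-- pv_equiv track=rewrite | github.com/marynavek/Computer_Vision | HW_3_Decision_functions/main_2.py | get_all_terms
-- ===== SOURCE A (Python) =====
-- from itertools import product
--
-- def get_all_combinations(r,n):
--     all_combinations = []
--     for combination in product(range(1, n+1), repeat=r):
--         all_combinations.append(combination)
--
--     final_result = []
--     for i in all_combinations:
--         array = list(i)
--         array.sort()
--         if array not in final_result:
--             final_result.append(array)
--     return final_result
--
-- def clean_up_combinations(initial_combinations):
--     final_combinations = []
--     for combinations in initial_combinations:
--         for combination in combinations:
--             if combination not in final_combinations:
--                 final_combinations.append(combination)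
--     final_combinations.sort()
--     return final_combinations
--
-- def get_all_terms(n,r, weights, functions):
--     all_combinations = []
--     #get_all_combinations_for_summations
--     for i in range(1,r+1):
--         for d in range(1, n+1):
--             combinations = get_all_combinations(i,d)
--             all_combinations.append(combinations)
--     final_combinations = clean_up_combinations(all_combinations)
--     all_terms = []
--     all_terms_2 = []
--     for combination in final_combinations:
--         weight_term = ""
--         function_term = ""
--         weight_number = ""
--
--         for x in combination:
--             weight_term += weights[x-1]
--             weight_number += str(x)
--             function_term += functions[x-1]
--         combined_term = weight_term+function_term
--         all_terms.append(combined_term)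
--         weight_combined = "w"+weight_number
--         # function_combined = "x"+function_number
--         combined_t = weight_combined + function_term
--         all_terms_2.append(combined_t)
--
--     all_terms.append(weights[n])
--     all_terms.sort()
--     all_terms_2.append(weights[n])
--
--     return all_terms, all_terms_2
-- ===== SOURCE B (Python) =====
-- from itertools import combinations_with_replacement
--
-- def get_all_terms(n, r, weights, functions):
--     final_combinations = []
--     for size in range(1, r + 1):
--         for combo in combinations_with_replacement(range(1, n + 1), size):
--             final_combinations.append(list(combo))
--     final_combinations.sort()
--
--     all_terms = []
--     all_terms_2 = []
--     for combination in final_combinations: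
--         weight_term = ""
--         function_term = ""
--         weight_number = ""
--         for x in combination:
--             weight_term += weights[x - 1]
--             weight_number += str(x)
--             function_term += functions[x - 1]
--         all_terms.append(weight_term + function_term)
--         all_terms_2.append("w" + weight_number + function_term)
--
--     all_terms.append(weights[n])
--     all_terms.sort()
--     all_terms_2.append(weights[n])
--     return all_terms, all_terms_2
-- ===== Notes on version B (the rewrite author's own statement) =====
-- stated objective: simpler
-- what changed: Deletes get_all_combinations and clean_up_combinations: instead of enumerating cartesian products of [1..d]^i for every i<=r, d<=n and sorting/deduplicating them twice, B generates each nondecreasing index multiset exactly once with itertools.combinations_with_replacement(range(1,n+1), size) for size in 1..r and sorts the result once; the term-building loop is kept unchanged.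
import Mathlib
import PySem

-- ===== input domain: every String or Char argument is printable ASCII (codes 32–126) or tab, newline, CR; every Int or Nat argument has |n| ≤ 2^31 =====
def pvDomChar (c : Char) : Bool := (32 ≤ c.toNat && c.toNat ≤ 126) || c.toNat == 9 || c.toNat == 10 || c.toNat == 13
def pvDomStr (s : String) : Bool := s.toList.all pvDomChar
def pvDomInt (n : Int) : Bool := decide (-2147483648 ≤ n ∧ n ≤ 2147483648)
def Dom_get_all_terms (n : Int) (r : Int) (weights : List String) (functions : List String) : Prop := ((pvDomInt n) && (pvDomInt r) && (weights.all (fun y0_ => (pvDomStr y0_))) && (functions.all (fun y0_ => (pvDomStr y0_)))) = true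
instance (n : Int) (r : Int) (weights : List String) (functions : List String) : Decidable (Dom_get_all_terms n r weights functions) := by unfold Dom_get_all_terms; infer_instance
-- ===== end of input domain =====

-- B drops A's helpers (cartesian products, per-call sort+dedup, global dedup) and generates the
-- nondecreasing index multisets directly (combinations_with_replacement) followed by one sort; same outputs.

-- ===== PORT A =====
-- itertools.product(xs, repeat=k): leftmost coordinate varies slowest (exact CPython order)
def pyProductRep (xs : List Int) : Nat → List (List Int)
  | 0 => [[]]
  | k+1 => xs.flatMap (fun x => (pyProductRep xs k).map (x :: ·))

-- get_all_combinations(r, n); A only calls it with r ≥ 1 (r.toNat is exact there)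
def get_all_combinations (r n : Int) : List (List Int) :=
  ((pyProductRep (PySem.List.pyRange 1 (n+1)) r.toNat).foldl (fun acc c => acc ++ [c]) []).foldl
    (fun acc c => if PySem.List.sorted c (fun x => x) ∈ acc then acc
                  else acc ++ [PySem.List.sorted c (fun x => x)]) []

def clean_up_combinations (initial_combinations : List (List (List Int))) : List (List Int) :=
  PySem.List.sorted
    (initial_combinations.foldl (fun acc combos =>
      combos.foldl (fun acc2 c => if c ∈ acc2 then acc2 else acc2 ++ [c]) acc) [])
    (fun x => x)

-- the term-building loop, shared verbatim by A and by B (both Pythons contain it literally);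
-- weights[x-1] / functions[x-1] / weights[n]: pyGetD with "" — Pre_ guarantees the index is valid
def pvBuildTerms (weights functions : List String) (combos : List (List Int)) : List String × List String :=
  combos.foldl (fun ts combination =>
    let s := combination.foldl (fun (st : String × String × String) x =>
      (st.1 ++ PySem.List.pyGetD weights (x-1) "",
       st.2.1 ++ PySem.Int.toStr x,
       st.2.2 ++ PySem.List.pyGetD functions (x-1) "")) ("", "", "")
    (ts.1 ++ [s.1 ++ s.2.2], ts.2 ++ ["w" ++ s.2.1 ++ s.2.2])) ([], [])

def get_all_terms (n : Int) (r : Int) (weights : List String) (functions : List String) : List String × List String :=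
  let all_combinations := (PySem.List.pyRange 1 (r+1)).foldl (fun acc i =>
      (PySem.List.pyRange 1 (n+1)).foldl (fun acc2 d => acc2 ++ [get_all_combinations i d]) acc) []
  let final_combinations := clean_up_combinations all_combinations
  let ts := pvBuildTerms weights functions final_combinations
  (PySem.List.sorted (ts.1 ++ [PySem.List.pyGetD weights n ""]) (fun x => x),
   ts.2 ++ [PySem.List.pyGetD weights n ""])

-- ===== PORT B =====
-- itertools.combinations_with_replacement(xs, k), exact CPython order for a list xs
def cwr : List Int → Nat → List (List Int)
  | _, 0 => [[]]
  | [], _+1 => []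
  | x :: t, k+1 => (cwr (x :: t) k).map (x :: ·) ++ cwr t (k+1)
termination_by xs k => (xs.length, k)

def get_all_terms_alt (n : Int) (r : Int) (weights : List String) (functions : List String) : List String × List String :=
  let final_combinations := PySem.List.sorted
      ((PySem.List.pyRange 1 (r+1)).foldl (fun acc size =>
        acc ++ cwr (PySem.List.pyRange 1 (n+1)) size.toNat) [])
      (fun x => x)
  let ts := pvBuildTerms weights functions final_combinations
  (PySem.List.sorted (ts.1 ++ [PySem.List.pyGetD weights n ""]) (fun x => x),
   ts.2 ++ [PySem.List.pyGetD weights n ""])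

-- ===== PRECONDITION & SPEC =====
-- Exactly where Python A returns normally: weights[x-1]/functions[x-1] need n entries when any
-- combination is produced (r ≥ 1 and n ≥ 1), and weights[n] must be a valid (possibly negative) index.
def Pre_get_all_terms (n : Int) (r : Int) (weights : List String) (functions : List String) : Prop :=
  ((1 ≤ r ∧ 1 ≤ n) → (n ≤ weights.length ∧ n ≤ functions.length)) ∧
  (-(weights.length : Int) ≤ n ∧ n < weights.length)
instance (n : Int) (r : Int) (weights : List String) (functions : List String) : Decidable (Pre_get_all_terms n r weights functions) := by unfold Pre_get_all_terms; infer_instance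

def pvWitness_get_all_terms : Int × Int × List String × List String := (2, 2, ["a", "b", "c"], ["p", "q"])

def Spec_get_all_terms (n : Int) (r : Int) (weights : List String) (functions : List String) (out : List String × List String) : Prop := out = get_all_terms_alt n r weights functions
instance (n : Int) (r : Int) (weights : List String) (functions : List String) (out : List String × List String) : Decidable (Spec_get_all_terms n r weights functions out) := by unfold Spec_get_all_terms; infer_instance

-- ===== CLAIM (what is proved, stated in full; the proofs are below) =====
def Claim_equal_get_all_terms : Prop := ∀ (n : Int) (r : Int) (weights : List String) (functions : List String), Dom_get_all_terms n r weights functions → Pre_get_all_terms n r weights functions → Spec_get_all_terms n r weights functions (get_all_terms n r weights functions)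

-- ===== LEMMAS AND PROOFS =====

theorem pyRange_pairwise_lt (a b : Int) : (PySem.List.pyRange a b).Pairwise (· < ·) := by
  by_cases h : a < b
  · rw [PySem.List.pyRange_one_cons h]
    refine List.Pairwise.cons ?_ (pyRange_pairwise_lt (a+1) b)
    intro y hy
    have := PySem.List.mem_pyRange_one.mp hy
    omega
  · have hnil : PySem.List.pyRange a b = [] := by
      refine List.eq_nil_iff_forall_not_mem.mpr ?_
      intro x hx
      have := PySem.List.mem_pyRange_one.mp hx
      omega
    simp [hnil]
termination_by (b - a).toNat
decreasing_by omega

theorem mem_pyProductRep (xs : List Int) : ∀ (k : Nat) (t : List Int),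
    t ∈ pyProductRep xs k ↔ t.length = k ∧ ∀ v ∈ t, v ∈ xs := by
  intro k
  induction k with
  | zero => intro t; simp [pyProductRep, List.length_eq_zero_iff]; rintro rfl; simp
  | succ k ih =>
    intro t
    simp only [pyProductRep, List.mem_flatMap, List.mem_map]
    constructor
    · rintro ⟨x, hx, t', ht', rfl⟩
      obtain ⟨hl, hm⟩ := (ih t').mp ht'
      refine ⟨by simp [hl], ?_⟩
      intro v hv
      rcases List.mem_cons.mp hv with rfl | hv
      · exact hx
      · exact hm v hv
    · rintro ⟨hl, hm⟩
      cases t with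
      | nil => simp at hl
      | cons a t' =>
        refine ⟨a, hm a (by simp), t', (ih t').mpr ⟨by simpa using hl, ?_⟩, rfl⟩
        intro v hv
        exact hm v (List.mem_cons_of_mem _ hv)

-- A's 'if y not in acc: acc.append(y)' loop, with the appended value f c
theorem dedupFoldF (f : List Int → List Int) :
    ∀ (l : List (List Int)) (acc : List (List Int)), acc.Nodup →
      ((l.foldl (fun a c => if f c ∈ a then a else a ++ [f c]) acc).Nodup ∧
       ∀ y, y ∈ l.foldl (fun a c => if f c ∈ a then a else a ++ [f c]) acc ↔ (y ∈ acc ∨ y ∈ l.map f)) := by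
  intro l
  induction l with
  | nil => intro acc h; simpa using h
  | cons c l ih =>
    intro acc h
    simp only [List.foldl_cons]
    by_cases hc : f c ∈ acc
    · rw [if_pos hc]
      obtain ⟨h1, h2⟩ := ih acc h
      refine ⟨h1, ?_⟩
      intro y
      rw [h2 y]
      simp only [List.map_cons, List.mem_cons]
      constructor
      · rintro (hy | hy)
        · exact Or.inl hy
        · exact Or.inr (Or.inr hy)
      · rintro (hy | rfl | hy)
        · exact Or.inl hy
        · exact Or.inl hc
        · exact Or.inr hy
    · rw [if_neg hc]
      have hnd : (acc ++ [f c]).Nodup := by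
        refine List.Nodup.append h (List.nodup_singleton _) ?_
        intro a ha hb
        simp only [List.mem_singleton] at hb
        exact hc (hb ▸ ha)
      obtain ⟨h1, h2⟩ := ih (acc ++ [f c]) hnd
      refine ⟨h1, ?_⟩
      intro y
      rw [h2 y]
      simp only [List.mem_append, List.map_cons, List.mem_cons]
      tauto

-- same loop with the value itself (clean_up_combinations' inner loop)
theorem dedupFoldId (l acc : List (List Int)) (h : acc.Nodup) :
    ((l.foldl (fun a c => if c ∈ a then a else a ++ [c]) acc).Nodup ∧
     ∀ y, y ∈ l.foldl (fun a c => if c ∈ a then a else a ++ [c]) acc ↔ (y ∈ acc ∨ y ∈ l)) := by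
  simpa using dedupFoldF (fun c => c) l acc h

theorem mem_gac (i d : Int) (y : List Int) :
    y ∈ get_all_combinations i d ↔
      y.Pairwise (· ≤ ·) ∧ y.length = i.toNat ∧ ∀ v ∈ y, 1 ≤ v ∧ v < d + 1 := by
  unfold get_all_combinations
  rw [PySem.List.foldl_append_singleton_eq_self]
  rw [(dedupFoldF (fun c => PySem.List.sorted c (fun x => x)) _ [] List.nodup_nil).2 y]
  simp only [List.nil_append, List.mem_nil_iff, false_or, List.mem_map]
  constructor
  · rintro ⟨t, ht, rfl⟩
    obtain ⟨hl, hm⟩ := (mem_pyProductRep _ _ t).mp ht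
    refine ⟨?_, ?_, ?_⟩
    · simpa using PySem.List.sorted_pairwise t (fun x => x)
    · rw [PySem.List.length_sorted]; exact hl
    · intro v hv
      have hv' : v ∈ t := (PySem.List.mem_sorted t (fun x => x) false v).mp hv
      exact PySem.List.mem_pyRange_one.mp (hm v hv')
  · rintro ⟨hp, hl, hm⟩
    refine ⟨y, (mem_pyProductRep _ _ y).mpr ⟨hl, ?_⟩, ?_⟩
    · intro v hv
      exact PySem.List.mem_pyRange_one.mpr (hm v hv)
    · exact PySem.List.sorted_eq_self_of_pairwise y (fun x => x) hp

theorem mem_cwr (xs : List Int) (k : Nat) :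
    ∀ c : List Int, xs.Pairwise (· < ·) →
      (c ∈ cwr xs k ↔ c.length = k ∧ c.Pairwise (· ≤ ·) ∧ ∀ v ∈ c, v ∈ xs) := by
  fun_induction cwr xs k with
  | case1 xs =>
    intro c hs
    simp only [List.mem_singleton]
    constructor
    · rintro rfl; simp
    · rintro ⟨hl, -, -⟩; exact List.length_eq_zero_iff.mp hl
  | case2 k =>
    intro c hs
    simp only [List.not_mem_nil, false_iff]
    rintro ⟨hl, -, hm⟩
    cases c with
    | nil => simp at hl
    | cons a c' => exact absurd (hm a (by simp)) (by simp)
  | case3 x t k ih1 ih2 =>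
    intro c hs
    have hxt : ∀ v ∈ t, x < v := by
      intro v hv; exact (List.pairwise_cons.mp hs).1 v hv
    have ht : t.Pairwise (· < ·) := (List.pairwise_cons.mp hs).2
    simp only [List.mem_append, List.mem_map]
    constructor
    · rintro (⟨c', hc', rfl⟩ | hc)
      · obtain ⟨hl, hp, hm⟩ := (ih1 c' hs).mp hc'
        refine ⟨by simp [hl], ?_, ?_⟩
        · refine List.pairwise_cons.mpr ⟨?_, hp⟩
          intro v hv
          rcases List.mem_cons.mp (hm v hv) with rfl | hv'
          · exact le_refl v
          · exact le_of_lt (hxt v hv')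
        · intro v hv
          rcases List.mem_cons.mp hv with rfl | hv'
          · simp
          · exact hm v hv'
      · obtain ⟨hl, hp, hm⟩ := (ih2 c ht).mp hc
        exact ⟨hl, hp, fun v hv => List.mem_cons_of_mem _ (hm v hv)⟩
    · rintro ⟨hl, hp, hm⟩
      cases c with
      | nil => simp at hl
      | cons a c' =>
        have hac' : ∀ v ∈ c', a ≤ v := (List.pairwise_cons.mp hp).1
        by_cases ha : a = x
        · subst ha
          refine Or.inl ⟨c', (ih1 c' hs).mpr ⟨by simpa using hl, (List.pairwise_cons.mp hp).2, ?_⟩, rfl⟩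
          intro v hv
          exact hm v (List.mem_cons_of_mem _ hv)
        · refine Or.inr ((ih2 (a :: c') ht).mpr ⟨hl, hp, ?_⟩)
          have hat : a ∈ t := by
            rcases List.mem_cons.mp (hm a (by simp)) with h | h
            · exact absurd h ha
            · exact h
          intro v hv
          rcases List.mem_cons.mp (hm v hv) with rfl | hv'
          · -- v = x occurs in a :: c' with a ≠ x : contradiction with a ≤ v < a
            exfalso
            rcases List.mem_cons.mp hv with h | h
            · exact ha h.symm
            · exact absurd (hac' _ h) (not_le.mpr (hxt a hat))
          · exact hv'

theorem cwr_length_mem (xs : List Int) (k : Nat) :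
    ∀ c : List Int, c ∈ cwr xs k → c.length = k := by
  fun_induction cwr xs k with
  | case1 xs => intro c h; simp only [List.mem_singleton] at h; subst h; rfl
  | case2 k => intro c h; simp at h
  | case3 x t k ih1 ih2 =>
    intro c h
    rcases List.mem_append.mp h with h1 | h2
    · obtain ⟨c', hc', rfl⟩ := List.mem_map.mp h1
      simp [ih1 c' hc']
    · exact ih2 c h2

theorem cwr_nodup (xs : List Int) (k : Nat) (hs : xs.Pairwise (· < ·)) : (cwr xs k).Nodup := by
  fun_induction cwr xs k with
  | case1 xs => simp
  | case2 k => simp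
  | case3 x t k ih1 ih2 =>
    have hxt : ∀ v ∈ t, x < v := by
      intro v hv; exact (List.pairwise_cons.mp hs).1 v hv
    have ht : t.Pairwise (· < ·) := (List.pairwise_cons.mp hs).2
    refine List.Nodup.append ((ih1 hs).map List.cons_injective) (ih2 ht) ?_
    intro y hy1 hy2
    obtain ⟨c', hc', rfl⟩ := List.mem_map.mp hy1
    have hmem : ∀ v ∈ (x :: c'), v ∈ t := ((mem_cwr t (k+1) _ ht).mp hy2).2.2
    exact absurd (hxt x (hmem x (by simp))) (lt_irrefl x)

-- the ports' default LT/DecidableLT instances on List Int agree with the LinearOrder ones,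
-- so the library perm-sort lemma transfers to the ports' sort
theorem sorted_perm_bridge (xs ys : List (List Int)) (h : xs.Perm ys) :
    PySem.List.sorted xs (fun x => x) = PySem.List.sorted ys (fun x => x) := by
  have e : ∀ zs : List (List Int),
      @PySem.List.sorted (List Int) (List Int) List.instLT (fun a b => List.decidableLT a b) zs (fun x => x) false
        = @PySem.List.sorted (List Int) (List Int)
            (@Preorder.toLT (List Int) (@PartialOrder.toPreorder (List Int) (@LinearOrder.toPartialOrder (List Int) List.instLinearOrder)))
            (@LinearOrder.toDecidableLT (List Int) List.instLinearOrder) zs (fun x => x) false := by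
    intro zs
    exact congrArg (fun f => zs.foldl (fun acc x => PySem.List.insertBy f x acc) ([] : List (List Int)))
      ((by funext a b; rw [decide_eq_decide]) :
        (fun (a b : List Int) => @decide (a < b) (List.decidableLT a b))
          = fun a b => @decide (a < b) (@LinearOrder.toDecidableLT (List Int) List.instLinearOrder a b))
  rw [e xs, e ys]
  exact @PySem.List.sorted_eq_sorted_of_perm (List Int) (List Int) List.instLinearOrder xs ys
    (fun x => x) (fun a b hh => hh) h

-- the two generation strategies produce the same sorted list of multisets
theorem final_eq (n r : Int) :
    clean_up_combinations ((PySem.List.pyRange 1 (r+1)).foldl (fun acc i =>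
        (PySem.List.pyRange 1 (n+1)).foldl (fun acc2 d => acc2 ++ [get_all_combinations i d]) acc) [])
    = PySem.List.sorted ((PySem.List.pyRange 1 (r+1)).foldl (fun acc size =>
        acc ++ cwr (PySem.List.pyRange 1 (n+1)) size.toNat) []) (fun x => x) := by
  have hrangeN : (PySem.List.pyRange 1 (n+1)).Pairwise (· < ·) := pyRange_pairwise_lt 1 (n+1)
  -- normalise A's nested collection loop to a flatMap
  have hA : ((PySem.List.pyRange 1 (r+1)).foldl (fun acc i =>
        (PySem.List.pyRange 1 (n+1)).foldl (fun acc2 d => acc2 ++ [get_all_combinations i d]) acc) [])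
      = (PySem.List.pyRange 1 (r+1)).flatMap (fun i => (PySem.List.pyRange 1 (n+1)).map (get_all_combinations i)) := by
    simp only [PySem.List.foldl_append_singleton_eq_map]
    simpa using PySem.List.foldl_append_eq_flatMap
      (fun i => (PySem.List.pyRange 1 (n+1)).map (get_all_combinations i)) (PySem.List.pyRange 1 (r+1)) []
  -- normalise B's collection loop to a flatMap
  have hB : ((PySem.List.pyRange 1 (r+1)).foldl (fun acc size =>
        acc ++ cwr (PySem.List.pyRange 1 (n+1)) size.toNat) [])
      = (PySem.List.pyRange 1 (r+1)).flatMap (fun size => cwr (PySem.List.pyRange 1 (n+1)) size.toNat) := by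
    simpa using PySem.List.foldl_append_eq_flatMap
      (fun size => cwr (PySem.List.pyRange 1 (n+1)) size.toNat) (PySem.List.pyRange 1 (r+1)) []
  rw [hA, hB]
  unfold clean_up_combinations
  rw [← List.foldl_flatten]
  set L := ((PySem.List.pyRange 1 (r+1)).flatMap (fun i =>
      (PySem.List.pyRange 1 (n+1)).map (get_all_combinations i))).flatten with hL
  obtain ⟨hnd, hmem⟩ := dedupFoldId L [] List.nodup_nil
  set final0 := (PySem.List.pyRange 1 (r+1)).flatMap
      (fun size => cwr (PySem.List.pyRange 1 (n+1)) size.toNat) with hF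
  have hndB : final0.Nodup := by
    rw [hF, List.nodup_flatMap]
    constructor
    · intro s _
      exact cwr_nodup _ _ hrangeN
    · refine List.Pairwise.imp_of_mem ?_ (pyRange_pairwise_lt 1 (r+1))
      intro i j hi hj hij c hci hcj
      have h1 := cwr_length_mem _ _ c hci
      have h2 := cwr_length_mem _ _ c hcj
      have hi1 : 1 ≤ i := (PySem.List.mem_pyRange_one.mp hi).1
      omega
  have hperm : (L.foldl (fun a c => if c ∈ a then a else a ++ [c]) []).Perm final0 := by
    rw [List.perm_ext_iff_of_nodup hnd hndB]
    intro y
    rw [hmem y]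
    simp only [List.mem_nil_iff, false_or, hL, hF, List.mem_flatten, List.mem_flatMap, List.mem_map]
    constructor
    · rintro ⟨l, ⟨i, hi, d, hd, rfl⟩, hy⟩
      obtain ⟨hp, hlen, hm⟩ := (mem_gac i d y).mp hy
      obtain ⟨hi1, hi2⟩ := PySem.List.mem_pyRange_one.mp hi
      obtain ⟨hd1, hd2⟩ := PySem.List.mem_pyRange_one.mp hd
      refine ⟨i, hi, (mem_cwr _ _ y hrangeN).mpr ⟨hlen, hp, ?_⟩⟩
      intro v hv
      have := hm v hv
      exact PySem.List.mem_pyRange_one.mpr (by omega)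
    · rintro ⟨s, hs, hy⟩
      obtain ⟨hlen, hp, hm⟩ := (mem_cwr _ _ y hrangeN).mp hy
      obtain ⟨hs1, hs2⟩ := PySem.List.mem_pyRange_one.mp hs
      have hy0 : y ≠ [] := by
        intro h
        subst h
        simp at hlen
        omega
      obtain ⟨v0, hv0⟩ := List.exists_mem_of_ne_nil y hy0
      have hn1 : 1 ≤ n := by
        have := PySem.List.mem_pyRange_one.mp (hm v0 hv0)
        omega
      refine ⟨(get_all_combinations s n : List (List Int)), ⟨s, hs, n, PySem.List.mem_pyRange_one.mpr (by omega), rfl⟩, ?_⟩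
      refine (mem_gac s n y).mpr ⟨hp, hlen, ?_⟩
      intro v hv
      have := PySem.List.mem_pyRange_one.mp (hm v hv)
      omega
  exact sorted_perm_bridge _ _ hperm

-- ===== VERDICT (by name: the statement is the Claim_ definition above) =====
theorem get_all_terms_spec : Claim_equal_get_all_terms := by
  intro n r weights functions _ _
  simp only [Spec_get_all_terms, get_all_terms, get_all_terms_alt]
  rw [final_eq n r]
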